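-- pv_equiv track=rewrite | github.com/andredalton/bcc | 2014/LABPROG2/miniep2/miniep2.py | compara
-- ===== SOURCE A (Python) =====
-- def compara(chave, lst):
--     """Compara usuários da lista lst através da chave
--
--     A comparacão ocorre montando um dicionário de listas de usuário
--     temporáriamente em dic. Uma vez que todo o dicionário está montado
--     os índices do dicionário que contém mais do que um elemento são
--     copiados para o dicionário de retorno ret."""
--     dic = {}
--     ret = {}
--     for line in lst:
--         if chave == 'nome' and len(str.split(line['nome'])) > 1:
--             key = str.split(line['nome'])[0] + " " + str.split(line['nome'])[-1]
--         else:
--             key = line[chave]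
--         if key not in dic:
--             dic[key] = [line['usuario']]
--         else:
--             dic[key].append(line['usuario'])
--     for key in dic.keys():
--         if len(dic[key]) > 1:
--             ret[key] = dic[key]
--     return ret
-- ===== SOURCE B (Python) =====
-- def compara(chave, lst):
--     """Same result as A: keys (first + last word of the name when chave ==
--     'nome' and the name has several words) mapped to the usuario lists of the
--     users sharing that key, keeping only keys shared by more than one user.
--     Different decomposition: one pass computes every key, a counting dict is
--     built over the key list, and a single emit pass appends usuarios only for
--     keys whose total count exceeds 1 -- no full grouping dict is ever built."""
--     def key_of(line):
--         if chave == 'nome' and len(str.split(line['nome'])) > 1: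
--             w = str.split(line['nome'])
--             return w[0] + " " + w[-1]
--         return line[chave]
--     keys = [key_of(line) for line in lst]
--     counts = {}
--     for k in keys:
--         counts[k] = counts.get(k, 0) + 1
--     ret = {}
--     for k, line in zip(keys, lst):
--         if counts[k] > 1:
--             if k not in ret:
--                 ret[k] = []
--             ret[k].append(line['usuario'])
--     return ret
-- ===== Notes on version B (the rewrite author's own statement) =====
-- stated objective: alternative
-- what changed: A builds a full grouping dict of every key and then filters the groups with more than one member; B never builds the full grouping: it computes the key list in one pass, counts key occurrences in a dict, and a single emit pass appends usuarios only for keys whose total count exceeds 1.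
import Mathlib
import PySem

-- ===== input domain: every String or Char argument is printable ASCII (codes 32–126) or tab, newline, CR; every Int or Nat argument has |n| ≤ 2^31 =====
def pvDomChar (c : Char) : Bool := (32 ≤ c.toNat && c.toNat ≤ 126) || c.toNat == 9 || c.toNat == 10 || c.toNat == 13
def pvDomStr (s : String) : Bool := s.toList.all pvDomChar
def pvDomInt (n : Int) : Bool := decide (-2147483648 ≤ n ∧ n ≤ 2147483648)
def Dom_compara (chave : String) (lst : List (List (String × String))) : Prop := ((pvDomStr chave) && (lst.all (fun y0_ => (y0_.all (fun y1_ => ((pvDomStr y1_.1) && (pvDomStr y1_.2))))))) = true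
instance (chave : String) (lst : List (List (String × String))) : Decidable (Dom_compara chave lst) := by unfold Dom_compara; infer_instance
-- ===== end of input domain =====

-- B replaces A's group-everything-then-filter with count-keys-then-emit-only-duplicates (alternative decomposition, same asymptotics).


-- ===== PORT A =====
-- shared key computation (identical in Source A and Source B): first word + " " + last word
-- of line['nome'] when chave == 'nome' and the name has several words, else line[chave].
-- Missing keys (Python KeyError) are excluded by Pre_compara; getD's default is never used there.
def keyOf (chave : String) (line : List (String × String)) : String :=
  if chave == "nome" && (PySem.Str.split₀ ((PySem.Dict.mk line).getD "nome" "")).length > 1 then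
    PySem.List.pyGetD (PySem.Str.split₀ ((PySem.Dict.mk line).getD "nome" "")) 0 ""
      ++ " " ++ PySem.List.pyGetD (PySem.Str.split₀ ((PySem.Dict.mk line).getD "nome" "")) (-1) ""
  else (PySem.Dict.mk line).getD chave ""

def compara (chave : String) (lst : List (List (String × String))) : List (String × List String) :=
  let dic := lst.foldl (fun d line =>
      let key := keyOf chave line
      if d.contains key = false then d.insert key [(PySem.Dict.mk line).getD "usuario" ""]
      else d.modify key [] (fun v => v ++ [(PySem.Dict.mk line).getD "usuario" ""])) PySem.Dict.empty
  let ret := dic.keys.foldl (fun r key =>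
      if (dic.getD key []).length > 1 then r.insert key (dic.getD key []) else r) PySem.Dict.empty
  ret.items

-- ===== PORT B =====
def compara_alt (chave : String) (lst : List (List (String × String))) : List (String × List String) :=
  let keys := lst.map (keyOf chave)
  let counts := PySem.Dict.counter keys
  let ret := (keys.zip lst).foldl (fun r p =>
      if counts.getD p.1 0 > 1 then
        let r1 := if r.contains p.1 = false then r.insert p.1 ([] : List String) else r
        r1.modify p.1 [] (fun v => v ++ [(PySem.Dict.mk p.2).getD "usuario" ""])
      else r) PySem.Dict.empty
  ret.items

-- ===== PRECONDITION & SPEC =====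
-- Pre_ excludes exactly the inputs on which A raises KeyError: a line missing the
-- chave field or the 'usuario' field.
def Pre_compara (chave : String) (lst : List (List (String × String))) : Prop :=
  (lst.all (fun line => (PySem.Dict.mk line).contains chave && (PySem.Dict.mk line).contains "usuario")) = true
instance (chave : String) (lst : List (List (String × String))) : Decidable (Pre_compara chave lst) := by unfold Pre_compara; infer_instance

def pvWitness_compara : String × (List (List (String × String))) :=
  ("nome", [[("nome", "ana b silva"), ("usuario", "u1")], [("nome", "ana c silva"), ("usuario", "u2")]])

def Spec_compara (chave : String) (lst : List (List (String × String))) (out : List (String × List String)) : Prop := out = compara_alt chave lst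
instance (chave : String) (lst : List (List (String × String))) (out : List (String × List String)) : Decidable (Spec_compara chave lst out) := by unfold Spec_compara; infer_instance

-- ===== CLAIM (what is proved, stated in full; the proofs are below) =====
def Claim_equal_compara : Prop := ∀ (chave : String) (lst : List (List (String × String))), Dom_compara chave lst → Pre_compara chave lst → Spec_compara chave lst (compara chave lst)

-- ===== LEMMAS AND PROOFS =====

-- the (key, usuario) pairs both programs effectively traverse
def pvPairs (chave : String) (lst : List (List (String × String))) : List (String × String) :=
  lst.map (fun line => (keyOf chave line, (PySem.Dict.mk line).getD "usuario" ""))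

def pvKeys (chave : String) (lst : List (List (String × String))) : List String :=
  (pvPairs chave lst).map (fun q => q.1)

def pvVals (ps : List (String × String)) (k : String) : List String :=
  (ps.filter (fun q => q.1 == k)).map (fun q => q.2)

-- A's grouping step (insert-or-append) IS one modify
lemma stepA_eq (d : PySem.Dict String (List String)) (k u : String) :
    (if d.contains k = false then d.insert k [u] else d.modify k [] (fun v => v ++ [u]))
      = d.modify k [] (fun v => v ++ [u]) := by
  by_cases h : d.contains k = false
  · simp [h, PySem.Dict.modify, PySem.Dict.getD_of_not_contains d [] h]
  · simp [h]

-- B's emit step (setdefault-[]-then-append) IS one modify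
lemma stepB_eq (r : PySem.Dict String (List String)) (k u : String) :
    ((if r.contains k = false then r.insert k ([] : List String) else r).modify k []
        (fun v => v ++ [u]))
      = r.modify k [] (fun v => v ++ [u]) := by
  by_cases h : r.contains k = false
  · simp [h, PySem.Dict.modify, PySem.Dict.getD_of_not_contains r [] h,
      PySem.Dict.getD_insert_self, PySem.Dict.insert_insert_self]
  · simp [h]

-- items of a filtered fresh-insert loop (A's second loop)
lemma foldl_insert_if_items (v : String → List String) (c : String → Prop) [DecidablePred c] :
    ∀ (ks : List String) (r : PySem.Dict String (List String)), ks.Nodup →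
      (∀ k ∈ ks, r.contains k = false) →
      (ks.foldl (fun r k => if c k then r.insert k (v k) else r) r).items
        = r.items ++ (ks.filter (fun k => decide (c k))).map (fun k => (k, v k)) := by
  intro ks
  induction ks with
  | nil => intro r _ _; simp
  | cons k ks ih =>
    intro r hnd hfresh
    rw [List.nodup_cons] at hnd
    obtain ⟨hknot, hnd2⟩ := hnd
    have hk : r.contains k = false := hfresh k (by simp)
    by_cases hp : c k
    · have hfresh' : ∀ k' ∈ ks, (r.insert k (v k)).contains k' = false := by
        intro k' hk'
        rw [PySem.Dict.contains_insert]
        have : k' ≠ k := fun h => (by exact hknot (h ▸ hk'))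
        simp [this, hfresh k' (List.mem_cons_of_mem _ hk')]
      simp only [List.foldl_cons, if_pos hp]
      rw [ih _ hnd2 hfresh', PySem.Dict.items_insert_of_not_contains r (v k) hk]
      simp [hp]
    · simp only [List.foldl_cons, if_neg hp]
      rw [ih _ hnd2 (fun k' hk' => hfresh k' (List.mem_cons_of_mem _ hk'))]
      simp [hp]

-- PySem.Set.add commutes with filter
lemma add_filter (p : String → Bool) (s : PySem.Set String) (x : String) :
    (PySem.Set.add s x).filter p = if p x then PySem.Set.add (s.filter p) x else s.filter p := by
  by_cases hx : x ∈ s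
  · by_cases hp : p x
    · have hxf : x ∈ s.filter p := List.mem_filter.mpr ⟨hx, hp⟩
      simp [PySem.Set.add, hx, hp, hxf]
    · simp [PySem.Set.add, hx, hp]
  · have hxf : x ∉ List.filter p s := fun h => hx (List.mem_filter.mp h).1
    by_cases hp : p x
    · simp [PySem.Set.add, hx, hp, hxf, List.filter_append]
    · simp [PySem.Set.add, hx, hp]

-- hence PySem.Set.update commutes with filter
lemma update_filter (p : String → Bool) :
    ∀ (l : List String) (s : PySem.Set String),
      (PySem.Set.update s l).filter p = PySem.Set.update (s.filter p) (l.filter p) := by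
  intro l
  induction l with
  | nil => intro s; simp [PySem.Set.update_nil]
  | cons x l ih =>
    intro s
    have h1 : PySem.Set.update s (x :: l) = PySem.Set.update (PySem.Set.add s x) l := by
      simp [PySem.Set.update]
    rw [h1, ih, add_filter]
    by_cases hp : p x
    · simp only [List.filter_cons, hp, if_pos]
      simp [PySem.Set.update]
    · simp only [List.filter_cons, hp]
      simp [PySem.Set.update]

-- and so does PySem.Set.ofList
lemma ofList_filter (p : String → Bool) (l : List String) :
    PySem.Set.ofList (l.filter p) = (PySem.Set.ofList l).filter p := by
  have h1 : ∀ m : List String, PySem.Set.ofList m = PySem.Set.update ([] : PySem.Set String) m :=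
    fun m => rfl
  rw [h1, h1, update_filter]
  rfl

-- characterization of the grouping fold
def pvGroup (ps : List (String × String)) : PySem.Dict String (List String) :=
  ps.foldl (fun d q => d.modify q.1 [] (fun v => v ++ [q.2])) PySem.Dict.empty

lemma group_getD (ps : List (String × String)) (k : String) :
    (pvGroup ps).getD k [] = (ps.filter (fun q => q.1 == k)).map (fun q => q.2) := by
  simpa using PySem.Dict.getD_foldl_modify_append ps PySem.Dict.empty k

lemma group_keys (ps : List (String × String)) :
    (pvGroup ps).keys = PySem.Set.ofList (ps.map (fun q => q.1)) := by
  simpa using PySem.Dict.keys_foldl_modify_key ps (fun q => q.1) []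
    (fun _ q v => v ++ [q.2]) PySem.Dict.empty

lemma group_nodup (ps : List (String × String)) : (pvGroup ps).keys.Nodup := by
  exact PySem.Dict.nodup_keys_foldl_modify_key ps (fun q => q.1) []
    (fun _ q v => v ++ [q.2]) PySem.Dict.empty (by simp)

-- A computes: all distinct keys (first-occurrence order), each filtered by group size
lemma compara_char (chave : String) (lst : List (List (String × String))) :
    compara chave lst
      = ((PySem.Set.ofList (pvKeys chave lst)).filter
            (fun k => decide ((pvVals (pvPairs chave lst) k).length > 1))).map
          (fun k => (k, pvVals (pvPairs chave lst) k)) := by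
  simp only [compara]
  have hdic : (lst.foldl (fun d line =>
        if d.contains (keyOf chave line) = false then
          d.insert (keyOf chave line) [(PySem.Dict.mk line).getD "usuario" ""]
        else d.modify (keyOf chave line) [] (fun v => v ++ [(PySem.Dict.mk line).getD "usuario" ""]))
      PySem.Dict.empty) = pvGroup (pvPairs chave lst) := by
    have h2 : pvGroup (pvPairs chave lst) = lst.foldl (fun d line =>
        d.modify (keyOf chave line) [] (fun v => v ++ [(PySem.Dict.mk line).getD "usuario" ""]))
        PySem.Dict.empty := by
      rw [pvGroup, pvPairs, List.foldl_map]
    rw [h2]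
    congr 1
    funext d line
    exact stepA_eq d (keyOf chave line) ((PySem.Dict.mk line).getD "usuario" "")
  rw [hdic]
  rw [foldl_insert_if_items (fun k => (pvGroup (pvPairs chave lst)).getD k [])
      (fun k => ((pvGroup (pvPairs chave lst)).getD k []).length > 1)
      (pvGroup (pvPairs chave lst)).keys PySem.Dict.empty
      (group_nodup (pvPairs chave lst)) (fun k _ => PySem.Dict.contains_empty k)]
  rw [group_keys]
  simp only [group_getD]
  simp [pvVals, pvKeys, PySem.Dict.empty]

-- B computes: the grouping of the pairs whose key occurs more than once
lemma compara_alt_char (chave : String) (lst : List (List (String × String))) :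
    compara_alt chave lst
      = (PySem.Set.ofList
            (((pvPairs chave lst).filter
                (fun q => decide (1 < (pvKeys chave lst).count q.1))).map (fun q => q.1))).map
          (fun k => (k, pvVals ((pvPairs chave lst).filter
                (fun q => decide (1 < (pvKeys chave lst).count q.1))) k)) := by
  simp only [compara_alt]
  have hzip : (lst.map (keyOf chave)).zip lst = lst.map (fun line => (keyOf chave line, line)) := by
    simpa using List.zip_map' (f := keyOf chave) (g := id) (l := lst)
  rw [hzip, List.foldl_map]
  have hstep : (fun (r : PySem.Dict String (List String)) line =>
        if (PySem.Dict.counter (lst.map (keyOf chave))).getD (keyOf chave line) 0 > 1 then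
          ((if r.contains (keyOf chave line) = false then r.insert (keyOf chave line) ([] : List String) else r).modify
            (keyOf chave line) [] (fun v => v ++ [(PySem.Dict.mk line).getD "usuario" ""]))
        else r)
      = fun r line =>
        if 1 < (lst.map (keyOf chave)).count (keyOf chave line) then
          r.modify (keyOf chave line) [] (fun v => v ++ [(PySem.Dict.mk line).getD "usuario" ""])
        else r := by
    funext r line
    rw [stepB_eq, PySem.Dict.getD_counter]
    by_cases h : 1 < (lst.map (keyOf chave)).count (keyOf chave line)
    · rw [if_pos (by exact_mod_cast h), if_pos h]
    · rw [if_neg (fun hc => h (by exact_mod_cast hc)), if_neg h]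
  rw [hstep]
  have hK : lst.map (keyOf chave) = pvKeys chave lst := by
    simp [pvKeys, pvPairs, List.map_map]
  rw [hK]
  have hfold : lst.foldl (fun (r : PySem.Dict String (List String)) line =>
        if 1 < (pvKeys chave lst).count (keyOf chave line) then
          r.modify (keyOf chave line) [] (fun v => v ++ [(PySem.Dict.mk line).getD "usuario" ""])
        else r) PySem.Dict.empty
      = (pvPairs chave lst).foldl (fun r q =>
          if 1 < (pvKeys chave lst).count q.1 then r.modify q.1 [] (fun v => v ++ [q.2]) else r)
          PySem.Dict.empty := by
    rw [pvPairs, List.foldl_map]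
  rw [hfold]
  have hprop : (fun (r : PySem.Dict String (List String)) (q : String × String) =>
        if 1 < (pvKeys chave lst).count q.1 then r.modify q.1 [] (fun v => v ++ [q.2]) else r)
      = fun r q =>
        if (fun q : String × String => decide (1 < (pvKeys chave lst).count q.1)) q = true then
          r.modify q.1 [] (fun v => v ++ [q.2]) else r := by
    funext r q
    by_cases h : 1 < (pvKeys chave lst).count q.1
    · simp [h]
    · simp [h]
  rw [hprop, ← List.foldl_filter]
  have hgrp : ((pvPairs chave lst).filter
        (fun q => decide (1 < (pvKeys chave lst).count q.1))).foldl
        (fun (r : PySem.Dict String (List String)) q => r.modify q.1 [] (fun v => v ++ [q.2]))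
        PySem.Dict.empty
      = pvGroup ((pvPairs chave lst).filter (fun q => decide (1 < (pvKeys chave lst).count q.1))) := rfl
  rw [hgrp, PySem.Dict.items_eq_map_keys _ (group_nodup _) [], group_keys]
  simp only [group_getD]
  simp [pvVals]

-- group size at k = multiplicity of k in the key list
lemma vals_length (ps : List (String × String)) (k : String) :
    (pvVals ps k).length = (ps.map (fun q => q.1)).count k := by
  simp only [pvVals, List.length_map, List.count_eq_countP, List.countP_map,
    ← List.countP_eq_length_filter]
  rfl

-- ===== VERDICT (by name: the statement is the Claim_ definition above) =====
theorem compara_spec : Claim_equal_compara := by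
  intro chave lst _ _
  unfold Spec_compara
  rw [compara_char, compara_alt_char]
  have hcnt : ∀ k, (pvVals (pvPairs chave lst) k).length = (pvKeys chave lst).count k :=
    fun k => vals_length (pvPairs chave lst) k
  -- normalize A's filter predicate to multiplicity form
  have hPA : (fun k => decide ((pvVals (pvPairs chave lst) k).length > 1))
      = (fun k => decide (1 < (pvKeys chave lst).count k)) := by
    funext k; rw [hcnt k]
  rw [hPA]
  -- B's key list is the filtered key list
  have h1 : ((pvPairs chave lst).filter
        (fun q => decide (1 < (pvKeys chave lst).count q.1))).map (fun q => q.1)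
      = (pvKeys chave lst).filter (fun k => decide (1 < (pvKeys chave lst).count k)) := by
    rw [pvKeys, List.filter_map]
    rfl
  rw [h1, ofList_filter]
  apply List.map_congr_left
  intro k hk
  have hk1 : 1 < (pvKeys chave lst).count k := by
    have := (List.mem_filter.mp hk).2
    simpa using this
  congr 1
  rw [pvVals, pvVals, List.filter_filter]
  congr 1
  apply List.filter_congr
  intro q hq
  by_cases hqk : q.1 = k
  · simp [hqk, hk1]
  · simp [hqk]
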